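-- pv_equiv track=rewrite | github.com/BlockScience/koi-net | src/koi_net/infra/build_artifact.py | reverse_adj_list
-- ===== SOURCE A (Python) =====
-- def reverse_adj_list(adj: dict[str, set[str]]):
--     r_adj: dict[str, set[str]] = {}
--     for node in adj:
--         r_adj.setdefault(node, set())
--         for n in adj[node]:
--             r_adj.setdefault(n, set())
--             r_adj[n].add(node)
--     return r_adj
-- ===== SOURCE B (Python) =====
-- def reverse_adj_list(adj: dict[str, set[str]]):
--     # one dict comprehension: every node (source or target, first-occurrence order)
--     # mapped to the set of sources whose adjacency set contains it
--     nodes = dict.fromkeys(k for node, targets in adj.items() for k in (node, *targets))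
--     return {k: {src for src, targets in adj.items() if k in targets} for k in nodes}
-- ===== Notes on version B (the rewrite author's own statement) =====
-- stated objective: alternative
-- what changed: A streams every edge once, mutating a growing dict with setdefault/add; B builds the node set (sources then targets, first occurrence) once and computes each node's predecessor set by a membership scan over the sources, as one dict comprehension.
import Mathlib
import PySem

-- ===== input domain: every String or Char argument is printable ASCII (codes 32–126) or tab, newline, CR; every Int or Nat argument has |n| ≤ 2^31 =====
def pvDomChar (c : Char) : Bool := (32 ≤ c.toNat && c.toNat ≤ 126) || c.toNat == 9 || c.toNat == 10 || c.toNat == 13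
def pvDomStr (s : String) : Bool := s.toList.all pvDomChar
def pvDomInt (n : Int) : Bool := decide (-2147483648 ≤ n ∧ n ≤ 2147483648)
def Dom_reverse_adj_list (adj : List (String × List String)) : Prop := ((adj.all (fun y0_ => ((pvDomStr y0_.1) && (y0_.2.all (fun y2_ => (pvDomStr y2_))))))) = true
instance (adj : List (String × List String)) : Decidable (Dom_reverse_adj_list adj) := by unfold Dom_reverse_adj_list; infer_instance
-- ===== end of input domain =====

-- B replaces A's per-edge streaming updates with a single comprehension: the node set
-- (sources ∪ targets, first occurrence order) mapped to its predecessor scan — 'alternative',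
-- not claimed faster. Equivalence of the returned value is what is proved.

-- ===== PORT A =====
def reverse_adj_list (adj : List (String × List String)) : List (String × List String) :=
  let d := PySem.Dict.ofList adj
  let r := d.items.foldl (fun r p =>
    let r := r.setdefault p.1 PySem.Set.empty
    p.2.foldl (fun r n =>
      let r := r.setdefault n PySem.Set.empty
      r.modify n PySem.Set.empty (fun s => PySem.Set.add s p.1)) r)
    PySem.Dict.empty
  r.items

-- ===== PORT B =====
def reverse_adj_list_alt (adj : List (String × List String)) : List (String × List String) :=
  let d := PySem.Dict.ofList adj
  let nodes := PySem.Set.ofList (d.items.flatMap (fun p => p.1 :: p.2))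
  nodes.map (fun k =>
    (k, PySem.Set.ofList ((d.items.filter (fun p => decide (k ∈ p.2))).map Prod.fst)))

-- ===== PRECONDITION & SPEC =====
def Spec_reverse_adj_list (adj : List (String × List String)) (out : List (String × List String)) : Prop := out = reverse_adj_list_alt adj
instance (adj : List (String × List String)) (out : List (String × List String)) : Decidable (Spec_reverse_adj_list adj out) := by unfold Spec_reverse_adj_list; infer_instance

-- ===== CLAIM (what is proved, stated in full; the proofs are below) =====
def Claim_equal_reverse_adj_list : Prop := ∀ (adj : List (String × List String)), Dom_reverse_adj_list adj → Spec_reverse_adj_list adj (reverse_adj_list adj)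

-- ===== LEMMAS AND PROOFS =====

-- closed-form value of B at key k over an items list L
def pvVal (L : List (String × List String)) (k : String) : List String :=
  PySem.Set.ofList ((L.filter (fun p => decide (k ∈ p.2))).map Prod.fst)

theorem pvVal_not_mem (L : List (String × List String)) (k : String)
    (h : k ∉ PySem.Set.ofList (L.flatMap (fun p => p.1 :: p.2))) : pvVal L k = [] := by
  have hf : L.filter (fun p => decide (k ∈ p.2)) = [] := by
    rw [List.filter_eq_nil_iff]
    intro p hp hdec
    exact h ((PySem.Set.mem_ofList _ _).mpr
      (List.mem_flatMap.mpr ⟨p, hp, List.mem_cons_of_mem _ (of_decide_eq_true hdec)⟩))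
  simp [pvVal, hf, PySem.Set.ofList]

-- keys of a map-shaped dict
theorem keys_map_shape (d : PySem.Dict String (List String)) (M : List String)
    (V : String → List String) (hd : d.items = M.map (fun k => (k, V k))) :
    d.keys = M := by
  have hk : d.keys = d.items.map Prod.fst := rfl
  rw [hk, hd, List.map_map]
  exact List.map_id _

theorem items_setdefault_shape (d : PySem.Dict String (List String)) (M : List String)
    (V : String → List String)
    (hd : d.items = M.map (fun k => (k, V k))) (hV0 : ∀ k, k ∉ M → V k = []) (x : String) :
    (d.setdefault x PySem.Set.empty).items = (PySem.Set.add M x).map (fun k => (k, V k)) := by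
  have hkeys : d.keys = M := keys_map_shape d M V hd
  by_cases hx : x ∈ M
  · have hc : d.contains x = true := by
      rw [PySem.Dict.contains_iff_mem_keys, hkeys]; exact hx
    rw [PySem.Dict.setdefault_of_contains d _ hc, PySem.Set.add_of_mem hx, hd]
  · have hc : d.contains x = false := by
      rw [Bool.eq_false_iff]
      intro hcon
      exact hx (hkeys ▸ (PySem.Dict.contains_iff_mem_keys d x).mp hcon)
    rw [PySem.Dict.setdefault_of_not_contains d _ hc,
      PySem.Dict.items_insert_of_not_contains d _ hc, PySem.Set.add_of_not_mem hx,
      List.map_append, hd, List.map_singleton, hV0 x hx]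
    rfl

theorem items_modify_shape (d : PySem.Dict String (List String)) (M : List String)
    (V : String → List String) (hnd : M.Nodup)
    (hd : d.items = M.map (fun k => (k, V k))) (x : String) (hx : x ∈ M)
    (f : List String → List String) :
    (d.modify x PySem.Set.empty f).items = M.map (fun k => (k, if k = x then f (V x) else V k)) := by
  have hkeys : d.keys = M := keys_map_shape d M V hd
  have hmem : (x, V x) ∈ d.items := by
    rw [hd]; exact List.mem_map.mpr ⟨x, hx, rfl⟩
  have hget : d.getD x PySem.Set.empty = V x :=
    PySem.Dict.getD_of_mem_items d hmem (hkeys ▸ hnd) _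
  have hc : d.contains x = true := by
    rw [PySem.Dict.contains_iff_mem_keys, hkeys]; exact hx
  have hmod : d.modify x PySem.Set.empty f = d.insert x (f (d.getD x PySem.Set.empty)) := rfl
  rw [hmod, hget, PySem.Dict.items_insert_of_contains d _ hc, hd, List.map_map]
  apply List.map_congr_left
  intro k hk
  by_cases hkx : k = x
  · subst hkx; simp
  · simp [hkx, Function.comp]

theorem inner_fold_shape (ts : List String) (x : String) (M : List String)
    (V : String → List String) (hnd : M.Nodup) (hV0 : ∀ k, k ∉ M → V k = [])
    (d : PySem.Dict String (List String)) (hd : d.items = M.map (fun k => (k, V k))) :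
    (ts.foldl (fun r n =>
        (r.setdefault n PySem.Set.empty).modify n PySem.Set.empty
          (fun s => PySem.Set.add s x)) d).items
      = (PySem.Set.update M ts).map
          (fun k => (k, if k ∈ ts then PySem.Set.add (V k) x else V k)) := by
  induction ts generalizing M V d with
  | nil => simpa [PySem.Set.update_nil] using hd
  | cons n ts ih =>
    simp only [List.foldl_cons]
    have h1 := items_setdefault_shape d M V hd hV0 n
    have hnM1 : n ∈ PySem.Set.add M n := (PySem.Set.mem_add _ _ _).mpr (Or.inr rfl)
    have hnd1 : (PySem.Set.add M n).Nodup := PySem.Set.nodup_add _ n hnd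
    have h2 := items_modify_shape _ (PySem.Set.add M n) V hnd1 h1 n hnM1
      (fun s => PySem.Set.add s x)
    have hV01 : ∀ k, k ∉ PySem.Set.add M n →
        (if k = n then PySem.Set.add (V n) x else V k) = [] := by
      intro k hk
      have hkn : k ≠ n := fun h => hk (h ▸ hnM1)
      have hkM : k ∉ M := fun h => hk ((PySem.Set.mem_add _ _ _).mpr (Or.inl h))
      simp [hkn, hV0 k hkM]
    rw [ih (PySem.Set.add M n) _ hnd1 hV01 _ h2, PySem.Set.update_cons]
    apply List.map_congr_left
    intro k hk
    by_cases hkn : k = n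
    · subst hkn
      by_cases hts : k ∈ ts <;> simp [hts]
    · have : (k ∈ n :: ts) ↔ (k ∈ ts) := by simp [hkn]
      by_cases hts : k ∈ ts <;> simp [hts, hkn, this]

theorem main_shape (L : List (String × List String)) :
    (L.foldl (fun r p =>
      let r := r.setdefault p.1 PySem.Set.empty
      p.2.foldl (fun r n =>
        let r := r.setdefault n PySem.Set.empty
        r.modify n PySem.Set.empty (fun s => PySem.Set.add s p.1)) r)
      PySem.Dict.empty).items
    = (PySem.Set.ofList (L.flatMap (fun p => p.1 :: p.2))).map (fun k => (k, pvVal L k)) := by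
  induction L using List.reverseRecOn with
  | nil => rfl
  | append_singleton L p ih =>
    rw [List.foldl_append]
    simp only [List.foldl_cons, List.foldl_nil]
    have hS : (PySem.Set.ofList (L.flatMap (fun p => p.1 :: p.2))).Nodup :=
      PySem.Set.nodup_ofList _
    have hV0 : ∀ k, k ∉ PySem.Set.ofList (L.flatMap (fun p => p.1 :: p.2)) →
        pvVal L k = [] := fun k hk => pvVal_not_mem L k hk
    have h1 := items_setdefault_shape _ _ (pvVal L) ih hV0 p.1
    have hnd1 := PySem.Set.nodup_add _ p.1 hS
    have hV01 : ∀ k, k ∉ PySem.Set.add (PySem.Set.ofList (L.flatMap (fun p => p.1 :: p.2))) p.1 →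
        pvVal L k = [] := by
      intro k hk
      exact hV0 k (fun h => hk ((PySem.Set.mem_add _ _ _).mpr (Or.inl h)))
    have h2 := inner_fold_shape p.2 p.1 _ (pvVal L) hnd1 hV01 _ h1
    rw [h2]
    have hkeys : PySem.Set.ofList ((L ++ [p]).flatMap (fun q => q.1 :: q.2))
        = PySem.Set.update
            (PySem.Set.add (PySem.Set.ofList (L.flatMap (fun q => q.1 :: q.2))) p.1) p.2 := by
      rw [List.flatMap_append, PySem.Set.ofList_append]
      simp only [List.flatMap_cons, List.flatMap_nil, List.append_nil]
      rw [PySem.Set.update_cons]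
    rw [hkeys]
    apply List.map_congr_left
    intro k hk
    have hval : pvVal (L ++ [p]) k =
        if k ∈ p.2 then PySem.Set.add (pvVal L k) p.1 else pvVal L k := by
      unfold pvVal
      rw [List.filter_append, List.map_append, PySem.Set.ofList_append]
      by_cases hkp : k ∈ p.2
      · simp [hkp, PySem.Set.update_cons, PySem.Set.update_nil]
      · simp [hkp, PySem.Set.update_nil]
    rw [hval]

-- ===== VERDICT (by name: the statement is the Claim_ definition above) =====
theorem reverse_adj_list_spec : Claim_equal_reverse_adj_list := by
  intro adj _
  show _ = _
  unfold reverse_adj_list reverse_adj_list_alt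
  simpa [pvVal] using main_shape (PySem.Dict.ofList adj).items
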